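-- pv_equiv track=rewrite | github.com/martingiguere/hakko-203-firmware-video | fix_d_c_misread.py | swap_candidates
-- ===== SOURCE A (Python) =====
-- from itertools import combinations
--
-- def swap_candidates(addr):
--     """Generate all addresses reachable by swapping one or more 'C'↔'D' digits."""
--     c_positions = [i for i, ch in enumerate(addr) if ch == 'C']
--     d_positions = [i for i, ch in enumerate(addr) if ch == 'D']
--
--     candidates = set()
--     swap_positions = c_positions + d_positions
--
--     for r in range(1, len(swap_positions) + 1):
--         for combo in combinations(swap_positions, r):
--             trial = list(addr)
--             for pos in combo:
--                 trial[pos] = 'D' if trial[pos] == 'C' else 'C'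
--             candidates.add(''.join(trial))
--
--     candidates.discard(addr)  # don't include self
--     return candidates
-- ===== SOURCE B (Python) =====
-- def swap_candidates(addr):
--     """Generate all addresses reachable by swapping one or more 'C'<->'D' digits."""
--     c_positions = [i for i, ch in enumerate(addr) if ch == 'C']
--     d_positions = [i for i, ch in enumerate(addr) if ch == 'D']
--     swap_positions = c_positions + d_positions
--     n = len(swap_positions)
--     result = []
--     frontier = [(addr, 0)]
--     for _ in range(n):
--         new_frontier = []
--         for trial, start in frontier:
--             for k in range(start, n):
--                 pos = swap_positions[k]
--                 t2 = trial[:pos] + ('D' if trial[pos] == 'C' else 'C') + trial[pos + 1:]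
--                 result.append(t2)
--                 new_frontier.append((t2, k + 1))
--         frontier = new_frontier
--     return set(result)
-- ===== Notes on version B (the rewrite author's own statement) =====
-- stated objective: alternative
-- what changed: A enumerates subsets size-by-size with itertools.combinations and re-applies all r flips to a fresh copy of addr for every subset; B runs a breadth-first frontier over swap positions, deriving each candidate from its parent candidate by a single one-position string splice and resuming at the next position index, so combinations and the per-subset flip loop disappear.
import Mathlib
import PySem

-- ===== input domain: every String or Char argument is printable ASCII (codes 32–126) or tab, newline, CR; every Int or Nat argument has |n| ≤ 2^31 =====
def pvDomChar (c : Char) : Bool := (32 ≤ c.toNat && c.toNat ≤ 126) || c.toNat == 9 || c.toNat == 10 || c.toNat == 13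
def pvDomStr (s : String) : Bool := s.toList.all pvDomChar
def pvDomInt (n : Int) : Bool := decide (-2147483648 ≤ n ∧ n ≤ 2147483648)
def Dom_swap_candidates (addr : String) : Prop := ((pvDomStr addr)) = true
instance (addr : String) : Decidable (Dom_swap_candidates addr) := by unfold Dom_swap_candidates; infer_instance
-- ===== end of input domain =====

-- B replaces A's size-by-size itertools.combinations enumeration by a breadth-first frontier that extends each
-- already-flipped candidate by one later swap position (one splice per candidate instead of r flips from scratch).

-- ===== PORT A =====
-- trial[pos] = 'D' if trial[pos] == 'C' else 'C'  (pos comes from enumerate, so it is always in range)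
def pvFlip (t : List Char) (pos : Int) : List Char :=
  PySem.List.pySetD t pos (if PySem.List.pyGetD t pos ' ' == 'C' then 'D' else 'C')

-- Python str modeled as its list of code points; ''.join(trial) on a list of chars is String.ofList.
def swap_candidates (addr : String) : List String :=
  let l := addr.toList
  let c_positions := ((PySem.List.enumerate l 0).filter (fun p => p.2 == 'C')).map (fun p => p.1)
  let d_positions := ((PySem.List.enumerate l 0).filter (fun p => p.2 == 'D')).map (fun p => p.1)
  let swap_positions := c_positions ++ d_positions
  let candidates :=
    (PySem.List.pyRange 1 ((swap_positions.length : Int) + 1) 1).foldl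
      (fun cand r =>
        (PySem.List.combinations swap_positions r.toNat).foldl
          (fun cand combo =>
            PySem.Set.add cand (String.ofList (combo.foldl pvFlip l)))
          cand)
      PySem.Set.empty
  PySem.Set.discard candidates addr

-- ===== PORT B =====
-- t2 = trial[:pos] + ('D' if trial[pos] == 'C' else 'C') + trial[pos+1:]   (str slicing on the code-point list)
def pvSplice (t : List Char) (pos : Int) : List Char :=
  PySem.List.slice t none (some pos)
    ++ [if PySem.List.pyGetD t pos ' ' == 'C' then 'D' else 'C']
    ++ PySem.List.slice t (some (pos + 1)) none

def swap_candidates_alt (addr : String) : List String :=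
  let l := addr.toList
  let c_positions := ((PySem.List.enumerate l 0).filter (fun p => p.2 == 'C')).map (fun p => p.1)
  let d_positions := ((PySem.List.enumerate l 0).filter (fun p => p.2 == 'D')).map (fun p => p.1)
  let swap_positions := c_positions ++ d_positions
  let n := swap_positions.length
  let st :=
    (List.range n).foldl
      (fun (st : List String × List (List Char × Nat)) _ =>
        st.2.foldl
          (fun st2 ts =>
            (List.range' ts.2 (n - ts.2)).foldl
              (fun st3 k =>
                let t2 := pvSplice ts.1 (swap_positions.getD k 0)
                (st3.1 ++ [String.ofList t2], st3.2 ++ [(t2, k + 1)]))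
              st2)
          (st.1, []))
      ([], [(l, 0)])
  PySem.Set.ofList st.1

-- ===== PRECONDITION & SPEC =====
def Spec_swap_candidates (addr : String) (out : List String) : Prop := out = swap_candidates_alt addr
instance (addr : String) (out : List String) : Decidable (Spec_swap_candidates addr out) := by unfold Spec_swap_candidates; infer_instance

-- ===== CLAIM (what is proved, stated in full; the proofs are below) =====
def Claim_equal_swap_candidates : Prop := ∀ (addr : String), Dom_swap_candidates addr → Spec_swap_candidates addr (swap_candidates addr)

-- ===== LEMMAS AND PROOFS =====

-- flip of one character value
def pvFlipC (c : Char) : Char := if c == 'C' then 'D' else 'C'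

-- the common "all candidates" list both ports are proved equal to
def pvAll (l : List Char) (sp : List Int) : List String :=
  (List.range sp.length).flatMap (fun i =>
    (PySem.List.combinations sp (i + 1)).map (fun c => String.ofList (c.foldl pvFlip l)))

-- B's one-step frontier extension and its iterate
def pvExtS (sp : List Int) (ts : List Char × Nat) : List (List Char × Nat) :=
  (List.range' ts.2 (sp.length - ts.2)).map (fun k => (pvSplice ts.1 (sp.getD k 0), k + 1))

def pvGrow (sp : List Int) : Nat → (List Char × Nat) → List (List Char × Nat)
  | 0, ts => [ts]
  | m + 1, ts => (pvExtS sp ts).flatMap (pvGrow sp m)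

-- validity of the position list
def pvValid (l : List Char) (sp : List Int) : Prop :=
  ∀ p ∈ sp, ∃ j : Nat, p = (j : Int) ∧ j < l.length

theorem pvFlatMap_congr {α β : Type} (xs : List α) (f g : α → List β)
    (h : ∀ x ∈ xs, f x = g x) : xs.flatMap f = xs.flatMap g := by
  induction xs with
  | nil => rfl
  | cons x xs ih =>
    simp only [List.flatMap_cons, h x (List.mem_cons_self ..),
      ih (fun y hy => h y (List.mem_cons_of_mem _ hy))]

theorem pvFlipC_ne (c : Char) : pvFlipC c ≠ c := by
  unfold pvFlipC; split <;> simp_all [beq_iff_eq]; rintro rfl; simp_all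

theorem pvFlip_natCast (t : List Char) (j : Nat) :
    pvFlip t (j : Int) = t.set j (pvFlipC (t.getD j ' ')) := by
  simp [pvFlip, pvFlipC, PySem.List.pySetD_natCast, PySem.List.pyGetD_natCast]

theorem pvFlip_length (t : List Char) (p : Int) : (pvFlip t p).length = t.length := by
  simp [pvFlip, PySem.List.length_pySetD]

theorem pvSplice_eq_pvFlip (t : List Char) (j : Nat) (h : j < t.length) :
    pvSplice t (j : Int) = pvFlip t (j : Int) := by
  have h1 : ((j : Int) + 1) = ((j + 1 : Nat) : Int) := by push_cast; ring
  rw [pvSplice, h1, PySem.List.slice_to_natCast, PySem.List.slice_from_natCast,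
    PySem.List.pyGetD_natCast, pvFlip_natCast, List.set_eq_take_append_cons_drop,
    if_pos h]
  simp [pvFlipC]

-- the character at j after flipping a single valid position i
theorem pvFlip_getD (t : List Char) (i : Nat) (hi : i < t.length) (j : Nat) :
    (pvFlip t (i : Int)).getD j ' ' =
      if j = i then pvFlipC (t.getD i ' ') else t.getD j ' ' := by
  rw [pvFlip_natCast]
  by_cases hji : j = i
  · subst hji; simp [List.getD_eq_getElem?_getD, hi]
  · simp [List.getD_eq_getElem?_getD, Ne.symm hji, hji]

-- final character at each position after flipping a nodup list of valid positions
theorem pvFoldFlip_getD : ∀ (c : List Int) (t : List Char), c.Nodup →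
    (∀ p ∈ c, ∃ i : Nat, p = (i : Int) ∧ i < t.length) → ∀ (j : Nat), j < t.length →
    (c.foldl pvFlip t).getD j ' ' =
      if (j : Int) ∈ c then pvFlipC (t.getD j ' ') else t.getD j ' ' := by
  intro c
  induction c with
  | nil => intro t _ _ j _; simp
  | cons p c ih =>
    intro t hnd hv j hj
    obtain ⟨i, rfl, hi⟩ := hv _ (List.mem_cons_self ..)
    have hnotin : ((i : Int)) ∉ c := (List.nodup_cons.mp hnd).1
    have hv' : ∀ q ∈ c, ∃ i' : Nat, q = (i' : Int) ∧ i' < (pvFlip t (i : Int)).length := by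
      intro q hq
      obtain ⟨i', rfl, hi'⟩ := hv q (List.mem_cons_of_mem _ hq)
      exact ⟨i', rfl, by rw [pvFlip_length]; exact hi'⟩
    rw [List.foldl_cons,
      ih (pvFlip t (i : Int)) (List.nodup_cons.mp hnd).2 hv' j (by rw [pvFlip_length]; exact hj)]
    by_cases hjc : ((j : Int)) ∈ c
    · have hji : j ≠ i := by rintro rfl; exact hnotin hjc
      rw [if_pos hjc, pvFlip_getD t i hi j, if_neg hji,
        if_pos (List.mem_cons_of_mem _ hjc)]
    · rw [if_neg hjc, pvFlip_getD t i hi j]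
      by_cases hji : j = i
      · subst hji; rw [if_pos rfl, if_pos (List.mem_cons_self ..)]
      · rw [if_neg hji, if_neg (fun hmem => by
          rcases List.mem_cons.mp hmem with h | h
          · exact hji (by exact_mod_cast h)
          · exact hjc h)]

-- two sublists of a nodup list with the same members are equal
theorem pvSublist_ext : ∀ (sp c1 c2 : List Int), sp.Nodup → c1.Sublist sp →
    c2.Sublist sp → (∀ x, x ∈ c1 ↔ x ∈ c2) → c1 = c2 := by
  intro sp
  induction sp with
  | nil =>
    intro c1 c2 _ h1 h2 _
    rw [List.sublist_nil.mp h1, List.sublist_nil.mp h2]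
  | cons x sp ih =>
    intro c1 c2 hnd h1 h2 hmem
    have hx : x ∉ sp := (List.nodup_cons.mp hnd).1
    have hnd' : sp.Nodup := (List.nodup_cons.mp hnd).2
    rcases List.sublist_cons_iff.mp h1 with h1' | ⟨r1, rfl, hr1⟩
    · rcases List.sublist_cons_iff.mp h2 with h2' | ⟨r2, rfl, hr2⟩
      · exact ih c1 c2 hnd' h1' h2' hmem
      · exact absurd (h1'.subset ((hmem x).mpr (List.mem_cons_self ..))) hx
    · rcases List.sublist_cons_iff.mp h2 with h2' | ⟨r2, rfl, hr2⟩
      · exact absurd (h2'.subset ((hmem x).mp (List.mem_cons_self ..))) hx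
      · have hxr1 : x ∉ r1 := fun hc => hx (hr1.subset hc)
        have hxr2 : x ∉ r2 := fun hc => hx (hr2.subset hc)
        have hr : r1 = r2 := by
          apply ih r1 r2 hnd' hr1 hr2
          intro y
          constructor
          · intro hy
            have hyx : y ≠ x := fun h => hxr1 (h ▸ hy)
            rcases List.mem_cons.mp ((hmem y).mp (List.mem_cons_of_mem _ hy)) with h | h
            · exact absurd h hyx
            · exact h
          · intro hy
            have hyx : y ≠ x := fun h => hxr2 (h ▸ hy)
            rcases List.mem_cons.mp ((hmem y).mpr (List.mem_cons_of_mem _ hy)) with h | h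
            · exact absurd h hyx
            · exact h
        rw [hr]

-- flip results of distinct combos differ
theorem pvFlip_inj (l : List Char) (sp : List Int) (hv : pvValid l sp) (hnd : sp.Nodup)
    (c1 c2 : List Int) (h1 : c1.Sublist sp) (h2 : c2.Sublist sp) (hne : c1 ≠ c2) :
    c1.foldl pvFlip l ≠ c2.foldl pvFlip l := by
  intro heq
  have key : ∀ (d1 d2 : List Int), d1.Sublist sp → d2.Sublist sp →
      d1.foldl pvFlip l = d2.foldl pvFlip l → ∀ x ∈ d1, x ∈ d2 := by
    intro d1 d2 hs1 hs2 he x hx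
    by_contra hx2
    obtain ⟨j, rfl, hj⟩ := hv x (hs1.subset hx)
    have e1 := pvFoldFlip_getD d1 l (hs1.nodup hnd)
      (fun p hp => hv p (hs1.subset hp)) j hj
    have e2 := pvFoldFlip_getD d2 l (hs2.nodup hnd)
      (fun p hp => hv p (hs2.subset hp)) j hj
    rw [he, e2, if_neg hx2] at e1
    rw [if_pos hx] at e1
    exact pvFlipC_ne _ e1.symm
  exact hne (pvSublist_ext sp c1 c2 hnd h1 h2
    (fun x => ⟨fun h => key c1 c2 h1 h2 heq x h, fun h => key c2 c1 h2 h1 heq.symm x h⟩))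

theorem pvCombos_nodup : ∀ (xs : List Int) (r : Nat), xs.Nodup →
    (PySem.List.combinations xs r).Nodup := by
  intro xs
  induction xs with
  | nil =>
    intro r _
    cases r with
    | zero => simp [PySem.List.combinations_zero]
    | succ r => simp [PySem.List.combinations_nil_succ]
  | cons x xs ih =>
    intro r hnd
    have hx : x ∉ xs := (List.nodup_cons.mp hnd).1
    have hnd' : xs.Nodup := (List.nodup_cons.mp hnd).2
    cases r with
    | zero => simp [PySem.List.combinations_zero]
    | succ r =>
      rw [PySem.List.combinations_cons_succ]
      apply List.Nodup.append
      · exact List.Nodup.map List.cons_injective (ih r hnd')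
      · exact ih (r + 1) hnd'
      · intro c hc1 hc2
        obtain ⟨c', _, rfl⟩ := List.mem_map.mp hc1
        exact hx ((PySem.List.sublist_of_mem_combinations hc2).subset (List.mem_cons_self ..))

theorem pvAll_nodup (l : List Char) (sp : List Int) (hv : pvValid l sp) (hnd : sp.Nodup) :
    (pvAll l sp).Nodup := by
  have hA : pvAll l sp =
      ((List.range sp.length).flatMap (fun i => PySem.List.combinations sp (i + 1))).map
        (fun c => String.ofList (c.foldl pvFlip l)) := by
    rw [List.map_flatMap]; rfl
  rw [hA]
  apply List.Nodup.map_on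
  · intro c1 hc1 c2 hc2 he
    obtain ⟨i1, _, hm1⟩ := List.mem_flatMap.mp hc1
    obtain ⟨i2, _, hm2⟩ := List.mem_flatMap.mp hc2
    by_contra hne
    exact pvFlip_inj l sp hv hnd c1 c2 (PySem.List.sublist_of_mem_combinations hm1)
      (PySem.List.sublist_of_mem_combinations hm2) hne
      (by have h := congrArg String.toList he; simpa using h)
  · rw [List.nodup_flatMap]
    refine ⟨fun i _ => pvCombos_nodup sp (i + 1) hnd, ?_⟩
    apply List.Pairwise.imp ?_ (List.pairwise_lt_range (n := sp.length))
    intro i1 i2 hlt c hc1 hc2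
    have e1 := PySem.List.length_of_mem_combinations hc1
    have e2 := PySem.List.length_of_mem_combinations hc2
    omega

theorem pvAll_not_mem (l : List Char) (sp : List Int) (hv : pvValid l sp) (hnd : sp.Nodup) :
    String.ofList l ∉ pvAll l sp := by
  intro hmem
  unfold pvAll at hmem
  obtain ⟨i, _, hm⟩ := List.mem_flatMap.mp hmem
  obtain ⟨c, hc, he⟩ := List.mem_map.mp hm
  have hfold : c.foldl pvFlip l = l := by
    have h := congrArg String.toList he; simpa using h
  have hlen : c.length = i + 1 := PySem.List.length_of_mem_combinations hc
  have hcne : c ≠ [] := by intro h; rw [h] at hlen; simp at hlen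
  obtain ⟨p, hp⟩ := List.exists_mem_of_ne_nil c hcne
  obtain ⟨j, rfl, hj⟩ := hv p ((PySem.List.sublist_of_mem_combinations hc).subset hp)
  have h := pvFoldFlip_getD c l ((PySem.List.sublist_of_mem_combinations hc).nodup hnd)
    (fun q hq => hv q ((PySem.List.sublist_of_mem_combinations hc).subset hq)) j hj
  rw [hfold, if_pos hp] at h
  exact pvFlipC_ne _ h.symm

-- combinations, extension form: choose the first element, then a smaller combo of the rest
theorem pvCombos_ext (m : Nat) : ∀ (ys : List Int),
    PySem.List.combinations ys (m + 1) =
      (List.range ys.length).flatMap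
        (fun j => (PySem.List.combinations (ys.drop (j + 1)) m).map (fun c => ys.getD j 0 :: c)) := by
  intro ys
  induction ys with
  | nil => simp [PySem.List.combinations_nil_succ]
  | cons x xs ih =>
    rw [PySem.List.combinations_cons_succ, ih, List.length_cons, List.range_succ_eq_map,
      List.flatMap_cons, List.flatMap_map]
    simp only [List.drop_succ_cons, List.getD_cons_zero, List.getD_cons_succ, List.drop_zero]

-- the frontier grown from (t, k) enumerates exactly the combos of sp.drop k, in A's order
theorem pvGrow_fst (l : List Char) (sp : List Int) (hv : pvValid l sp) :
    ∀ (m : Nat) (t : List Char) (k : Nat), t.length = l.length →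
      (pvGrow sp m (t, k)).map Prod.fst =
        (PySem.List.combinations (sp.drop k) m).map (fun c => c.foldl pvFlip t) := by
  intro m
  induction m with
  | zero => intro t k _; simp [pvGrow, PySem.List.combinations_zero]
  | succ m ih =>
    intro t k hlen
    rw [pvGrow, List.map_flatMap, pvCombos_ext m (sp.drop k), List.map_flatMap]
    show (pvExtS sp (t, k)).flatMap _ = _
    rw [pvExtS]
    show ((List.range' k (sp.length - k)).map _).flatMap _ = _
    rw [List.flatMap_map, List.length_drop, List.range'_eq_map_range, List.flatMap_map]
    apply pvFlatMap_congr
    intro j hj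
    have hjlt : j < sp.length - k := List.mem_range.mp hj
    have hkj : k + j < sp.length := by omega
    have hmem : sp.getD (k + j) 0 ∈ sp := by
      rw [List.getD_eq_getElem?_getD, List.getElem?_eq_getElem hkj]
      exact List.getElem_mem hkj
    obtain ⟨i, hpi, hil⟩ := hv _ hmem
    have hit : i < t.length := by rw [hlen]; exact hil
    have hgd : (sp.drop k).getD j 0 = sp.getD (k + j) 0 := by
      rw [List.getD_eq_getElem?_getD, List.getD_eq_getElem?_getD, List.getElem?_drop]
    have hsplice : pvSplice t (sp.getD (k + j) 0) = pvFlip t (sp.getD (k + j) 0) := by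
      rw [hpi]; exact pvSplice_eq_pvFlip t i hit
    have hflen : (pvFlip t (sp.getD (k + j) 0)).length = l.length := by
      rw [pvFlip_length, hlen]
    rw [hsplice, ih (pvFlip t (sp.getD (k + j) 0)) (k + j + 1) hflen]
    rw [List.map_map, hgd, List.drop_drop]
    have harith : k + (j + 1) = k + j + 1 := by omega
    rw [harith]
    apply List.map_congr_left
    intro c _
    simp [List.foldl_cons]

-- a fold that appends one output and one frontier entry per index
theorem pvFoldPair {α β γ : Type} (xs : List α) (f : α → β) (g : α → γ) :
    ∀ (st : List β × List γ),
      xs.foldl (fun st3 k => (st3.1 ++ [f k], st3.2 ++ [g k])) st =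
        (st.1 ++ xs.map f, st.2 ++ xs.map g) := by
  induction xs with
  | nil => intro st; simp
  | cons x xs ih => intro st; simp [List.foldl_cons, ih]

-- one whole level: fold over the frontier
theorem pvFoldFront (sp : List Int) :
    ∀ (F : List (List Char × Nat)) (R : List String) (G : List (List Char × Nat)),
      F.foldl
        (fun st2 ts =>
          (List.range' ts.2 (sp.length - ts.2)).foldl
            (fun st3 k =>
              (st3.1 ++ [String.ofList (pvSplice ts.1 (sp.getD k 0))],
               st3.2 ++ [(pvSplice ts.1 (sp.getD k 0), k + 1)]))
            st2)
        (R, G) =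
      (R ++ (F.flatMap (pvExtS sp)).map (fun ts => String.ofList ts.1),
       G ++ F.flatMap (pvExtS sp)) := by
  intro F
  induction F with
  | nil => intro R G; simp
  | cons ts F ih =>
    intro R G
    rw [List.foldl_cons, pvFoldPair, ih]
    simp [pvExtS, List.map_map, List.flatMap_cons, List.append_assoc, Function.comp]

theorem pvGrow_succ (sp : List Int) : ∀ (m : Nat) (ts : List Char × Nat),
    pvGrow sp (m + 1) ts = (pvGrow sp m ts).flatMap (pvExtS sp) := by
  intro m
  induction m with
  | zero => intro ts; simp [pvGrow]
  | succ m ih =>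
    intro ts
    show (pvExtS sp ts).flatMap (pvGrow sp (m + 1)) = _
    rw [pvFlatMap_congr _ _ _ (fun u _ => ih u), ← List.flatMap_assoc]
    rfl

-- the outer loop: m levels of growth
theorem pvFoldOuter (sp : List Int) (l : List Char) : ∀ (m : Nat),
    (List.range m).foldl
      (fun (st : List String × List (List Char × Nat)) _ =>
        st.2.foldl
          (fun st2 ts =>
            (List.range' ts.2 (sp.length - ts.2)).foldl
              (fun st3 k =>
                (st3.1 ++ [String.ofList (pvSplice ts.1 (sp.getD k 0))],
                 st3.2 ++ [(pvSplice ts.1 (sp.getD k 0), k + 1)]))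
              st2)
          (st.1, []))
      ([], [(l, 0)]) =
    ((List.range m).flatMap (fun i => (pvGrow sp (i + 1) (l, 0)).map (fun ts => String.ofList ts.1)),
     pvGrow sp m (l, 0)) := by
  intro m
  induction m with
  | zero => simp [pvGrow]
  | succ m ih =>
    rw [List.range_succ, List.foldl_append, ih, List.foldl_cons, List.foldl_nil, pvFoldFront,
      List.flatMap_append, ← pvGrow_succ]
    exact Prod.ext (by simp) (by simp)

theorem pvSp_valid (l : List Char) :
    pvValid l ((((PySem.List.enumerate l 0).filter (fun p => p.2 == 'C')).map (fun p => p.1)) ++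
               (((PySem.List.enumerate l 0).filter (fun p => p.2 == 'D')).map (fun p => p.1))) := by
  intro p hp
  rcases List.mem_append.mp hp with h | h <;>
  · obtain ⟨q, hq, rfl⟩ := List.mem_map.mp h
    have hq' := (List.mem_filter.mp hq).1
    obtain ⟨k, hk, rfl⟩ := (PySem.List.mem_enumerate_iff _ _ _).mp hq'
    exact ⟨k, by simp, hk⟩

theorem pvSp_nodup (l : List Char) :
    ((((PySem.List.enumerate l 0).filter (fun p => p.2 == 'C')).map (fun p => p.1)) ++
     (((PySem.List.enumerate l 0).filter (fun p => p.2 == 'D')).map (fun p => p.1))).Nodup := by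
  have base : ∀ ch : Char,
      ((((PySem.List.enumerate l 0).filter (fun p => p.2 == ch)).map (fun p => p.1))).Nodup := by
    intro ch
    have h1 := (PySem.List.pairwise_lt_enumerate l 0).filter (fun p => p.2 == ch)
    have h2 : ((((PySem.List.enumerate l 0).filter (fun p => p.2 == ch)).map
        (fun p => p.1))).Pairwise (· < ·) := List.pairwise_map.mpr h1
    exact h2.imp ne_of_lt
  apply List.Nodup.append (base 'C') (base 'D')
  intro x hx1 hx2
  obtain ⟨q, hq, rfl⟩ := List.mem_map.mp hx1
  obtain ⟨q', hq', he⟩ := List.mem_map.mp hx2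
  have hqf := List.mem_filter.mp hq
  have hqf' := List.mem_filter.mp hq'
  obtain ⟨k, hk, rfl⟩ := (PySem.List.mem_enumerate_iff _ _ _).mp hqf.1
  obtain ⟨k', hk', rfl⟩ := (PySem.List.mem_enumerate_iff _ _ _).mp hqf'.1
  have hkk : k = k' := by
    have := he
    simp only at this
    omega
  subst hkk
  have hC : l[k] = 'C' := by simpa using hqf.2
  have hD : l[k] = 'D' := by simpa using hqf'.2
  rw [hC] at hD
  exact absurd hD (by decide)

-- a nested add-fold is building a set from the flattened list
theorem pvFoldAdd {α β : Type} (L : List α) (g : α → List β) (f : β → String) :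
    ∀ (s : PySem.Set String),
      L.foldl (fun cand x => (g x).foldl (fun c y => PySem.Set.add c (f y)) cand) s =
        ((L.flatMap g).map f).foldl PySem.Set.add s := by
  intro s
  rw [List.foldl_map, List.foldl_flatMap]

theorem pvDiscard_not_mem (s : List String) (x : String) (h : x ∉ s) :
    PySem.Set.discard s x = s := by
  show List.filter _ s = s
  rw [List.filter_eq_self]
  intro a ha
  have hax : (a == x) = false := beq_eq_false_iff_ne.mpr (fun hax => h (hax ▸ ha))
  simp [hax]

theorem pvA_eq (addr : String) :
    swap_candidates addr = pvAll addr.toList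
      ((((PySem.List.enumerate addr.toList 0).filter (fun p => p.2 == 'C')).map (fun p => p.1)) ++
       (((PySem.List.enumerate addr.toList 0).filter (fun p => p.2 == 'D')).map (fun p => p.1))) := by
  have hv := pvSp_valid addr.toList
  have hnd := pvSp_nodup addr.toList
  simp only [swap_candidates]
  rw [pvFoldAdd, PySem.Set.empty, ← PySem.Set.ofList_eq_foldl]
  rw [PySem.List.pyRange_one]
  rw [show ((((((PySem.List.enumerate addr.toList 0).filter (fun p => p.2 == 'C')).map (fun p => p.1)) ++
       (((PySem.List.enumerate addr.toList 0).filter (fun p => p.2 == 'D')).map (fun p => p.1))).length : Int) + 1 - 1).toNat =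
      ((((PySem.List.enumerate addr.toList 0).filter (fun p => p.2 == 'C')).map (fun p => p.1)) ++
       (((PySem.List.enumerate addr.toList 0).filter (fun p => p.2 == 'D')).map (fun p => p.1))).length from by omega]
  rw [List.flatMap_map]
  rw [pvFlatMap_congr _ _
    (fun k => PySem.List.combinations _ (k + 1))
    (fun k _ => by rw [show ((1 : Int) + (k : Int)).toNat = k + 1 from by omega])]
  rw [List.map_flatMap]
  unfold pvAll
  rw [PySem.Set.ofList_eq_self_of_nodup _ (by
    have h := pvAll_nodup addr.toList _ hv hnd
    unfold pvAll at h
    exact h)]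
  apply pvDiscard_not_mem
  have h := pvAll_not_mem addr.toList _ hv hnd
  rw [String.ofList_toList] at h
  unfold pvAll at h
  exact h

theorem pvB_eq (addr : String) :
    swap_candidates_alt addr = pvAll addr.toList
      ((((PySem.List.enumerate addr.toList 0).filter (fun p => p.2 == 'C')).map (fun p => p.1)) ++
       (((PySem.List.enumerate addr.toList 0).filter (fun p => p.2 == 'D')).map (fun p => p.1))) := by
  have hv := pvSp_valid addr.toList
  have hnd := pvSp_nodup addr.toList
  simp only [swap_candidates_alt]
  rw [pvFoldOuter]
  rw [pvFlatMap_congr _ _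
    (fun i => (PySem.List.combinations _ (i + 1)).map
      (fun c => String.ofList (c.foldl pvFlip addr.toList)))
    (fun i _ => by
      rw [show (fun ts : List Char × Nat => String.ofList ts.1) =
            (String.ofList ∘ Prod.fst) from rfl,
        ← List.map_map, pvGrow_fst addr.toList _ hv (i + 1) addr.toList 0 rfl,
        List.drop_zero, List.map_map]
      rfl)]
  exact PySem.Set.ofList_eq_self_of_nodup _ (pvAll_nodup _ _ hv hnd)

-- ===== VERDICT (by name: the statement is the Claim_ definition above) =====
theorem swap_candidates_spec : Claim_equal_swap_candidates := by
  intro addr _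
  unfold Spec_swap_candidates
  rw [pvA_eq, pvB_eq]
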